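-- pv_equiv track=rewrite | github.com/eric-fetty/pyTOON | src/pytoon/decoder.py | _find_char_unquoted
-- ===== SOURCE A (Python) =====
-- def _find_char_unquoted(text: str, char: str) -> int:
--     in_quote = False
--     bs = False
--     for i, c in enumerate(text):
--         if c == '\\':
--             bs = not bs
--             continue
--         if c == '"' and not bs:
--             in_quote = not in_quote
--         bs = False
--         if c == char and not in_quote:
--             return i
--     return -1
-- ===== SOURCE B (Python) =====
-- def _find_char_unquoted(text: str, char: str) -> int:
--     # Pass 1: run the quote/backslash state machine once, recording for each
--     # position whether it is eligible for a match (not a backslash, not in a quote).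
--     ok = []
--     in_quote = False
--     bs = False
--     for c in text:
--         if c == '\\':
--             ok.append(False)
--             bs = not bs
--             continue
--         if c == '"' and not bs:
--             in_quote = not in_quote
--         bs = False
--         ok.append(not in_quote)
--     # Pass 2: first eligible position holding char.
--     for i, (c, good) in enumerate(zip(text, ok)):
--         if good and c == char:
--             return i
--     return -1
-- ===== Notes on version B (the rewrite author's own statement) =====
-- stated objective: alternative
-- what changed: Splits A's single fused scan into two passes: one pass runs only the backslash/quote state machine and records an eligibility mask, a second pass scans text with the mask for the first matching position.
import Mathlib
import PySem

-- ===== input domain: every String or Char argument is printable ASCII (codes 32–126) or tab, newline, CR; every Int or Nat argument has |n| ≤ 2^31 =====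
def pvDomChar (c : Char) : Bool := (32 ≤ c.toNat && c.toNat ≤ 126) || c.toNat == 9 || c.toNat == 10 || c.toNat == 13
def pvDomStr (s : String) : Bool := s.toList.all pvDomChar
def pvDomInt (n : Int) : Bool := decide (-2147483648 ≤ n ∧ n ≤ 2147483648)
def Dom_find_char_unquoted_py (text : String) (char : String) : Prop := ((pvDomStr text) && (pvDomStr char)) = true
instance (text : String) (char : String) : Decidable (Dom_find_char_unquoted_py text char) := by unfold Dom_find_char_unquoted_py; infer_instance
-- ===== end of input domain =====

-- B is an alternative decomposition of equal cost: A's single fused scan is split into a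
-- state-machine pass producing an eligibility mask plus a separate search pass.

-- ===== PORT A =====
-- A's loop: index i, in_quote q, backslash flag bs; branches in A's order.
def pvFindLoopA (char : String) : List Char → Int → Bool → Bool → Int
  | [], _, _, _ => -1
  | c :: rest, i, q, bs =>
    if c = '\\' then
      pvFindLoopA char rest (i + 1) q (!bs)
    else
      let q' := if c = '"' && !bs then !q else q
      if String.mk [c] = char && !q' then i
      else pvFindLoopA char rest (i + 1) q' false

def find_char_unquoted_py (text : String) (char : String) : Int :=
  pvFindLoopA char text.toList 0 false false

-- ===== PORT B =====
-- Pass 1: the quote/backslash state machine alone, recording eligibility of each position.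
def pvMask : List Char → Bool → Bool → List Bool
  | [], _, _ => []
  | c :: rest, q, bs =>
    if c = '\\' then false :: pvMask rest q (!bs)
    else
      let q' := if c = '"' && !bs then !q else q
      (!q') :: pvMask rest q' false

-- Pass 2: first position where the mask allows a match and the character equals char.
def pvSearch (char : String) : List Char → List Bool → Int → Int
  | c :: rest, g :: gs, i =>
    if g && String.mk [c] = char then i else pvSearch char rest gs (i + 1)
  | _, _, _ => -1

def find_char_unquoted_py_alt (text : String) (char : String) : Int :=
  pvSearch char text.toList (pvMask text.toList false false) 0

-- ===== PRECONDITION & SPEC =====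
def Spec_find_char_unquoted_py (text : String) (char : String) (out : Int) : Prop := out = find_char_unquoted_py_alt text char
instance (text : String) (char : String) (out : Int) : Decidable (Spec_find_char_unquoted_py text char out) := by unfold Spec_find_char_unquoted_py; infer_instance

-- ===== CLAIM (what is proved, stated in full; the proofs are below) =====
def Claim_equal_find_char_unquoted_py : Prop := ∀ (text : String) (char : String), Dom_find_char_unquoted_py text char → Spec_find_char_unquoted_py text char (find_char_unquoted_py text char)

-- ===== LEMMAS AND PROOFS =====
-- Fusing the two passes of B from any state reproduces A's loop.
theorem pvFind_eq_search (char : String) (cs : List Char) :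
    ∀ (i : Int) (q bs : Bool),
      pvFindLoopA char cs i q bs = pvSearch char cs (pvMask cs q bs) i := by
  induction cs with
  | nil => intro i q bs; simp [pvFindLoopA, pvSearch]
  | cons c rest ih =>
    intro i q bs
    by_cases hc : c = '\\'
    · simp [pvFindLoopA, pvMask, pvSearch, hc, ih]
    · simp only [pvFindLoopA, pvMask, pvSearch, if_neg hc]
      set q' := if c = '"' && !bs then !q else q with hq'
      by_cases hm : String.mk [c] = char
      · cases q' <;> simp [hm, ih]
      · simp [hm, ih]

-- ===== VERDICT (by name: the statement is the Claim_ definition above) =====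
theorem find_char_unquoted_py_spec : Claim_equal_find_char_unquoted_py := by
  intro text char _
  unfold Spec_find_char_unquoted_py find_char_unquoted_py find_char_unquoted_py_alt
  exact pvFind_eq_search char text.toList 0 false false
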